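-- pv_equiv track=rewrite | github.com/CodyBuilder-dev/Algorithm-Coding-Test | problems/programmers/lv3/pgs-67258-twopoint.py | solution
-- ===== SOURCE A (Python) =====
-- def solution(gems):
--     original_s = set(gems)
--     if len(original_s) == 1:
--         return [1, 1]
--
--     # best_answer = [123456,456789]
--     interval_list = []
--
--     left, right = 0, 0
--     counter = {}
--     while True:
--         if len(counter) == len(original_s):  # 모든 보석이 포함되어 있음
--             interval_list.append([left + 1, right])
--
--             if counter[gems[left]] > 1:
--                 counter[gems[left]] -= 1
--             else:
--                 counter.pop(gems[left])
--             left += 1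
--
--         elif right >= len(gems):
--             break
--         else:
--             counter[gems[right]] = counter.get(gems[right], 0) + 1
--             right += 1
--
--     return sorted(interval_list, key=lambda x: (x[1] - x[0], x[0]))[0]
-- ===== SOURCE B (Python) =====
-- def solution(gems):
--     kinds = len(set(gems))
--     count = {}
--     best = None  # (start, end), 1-based inclusive
--     l = 0
--     for r, g in enumerate(gems):
--         count[g] = count.get(g, 0) + 1
--         while len(count) == kinds:
--             if best is None or (r - l, l + 1) < (best[1] - best[0], best[0]):
--                 best = (l + 1, r + 1)
--             lg = gems[l]
--             if count[lg] > 1: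
--                 count[lg] -= 1
--             else:
--                 count.pop(lg)
--             l += 1
--     return [best[0], best[1]]
-- ===== Notes on version B (the rewrite author's own statement) =====
-- stated objective: simpler
-- what changed: A appends every covering interval to a list during the two-pointer scan and finally sorts that list by (length, start) to take its head; B keeps a single running best interval under the same key during the scan, so no interval list is built and no sort happens (measured runtime is about the same, the shared scan dominates).
-- outside the precondition, e.g. on solution([]): A raises IndexError, B raises TypeError
import Mathlib
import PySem

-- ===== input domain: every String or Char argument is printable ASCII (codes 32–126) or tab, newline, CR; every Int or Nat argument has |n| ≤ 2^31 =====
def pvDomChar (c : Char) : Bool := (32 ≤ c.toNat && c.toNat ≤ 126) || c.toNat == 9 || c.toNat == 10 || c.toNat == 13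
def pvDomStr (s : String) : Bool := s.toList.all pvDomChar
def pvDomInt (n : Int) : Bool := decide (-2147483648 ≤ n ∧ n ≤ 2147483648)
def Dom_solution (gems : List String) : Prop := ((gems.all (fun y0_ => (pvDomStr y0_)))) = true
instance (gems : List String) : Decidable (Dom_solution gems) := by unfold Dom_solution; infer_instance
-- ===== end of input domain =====

-- B keeps a running best interval during the same two-pointer scan instead of collecting
-- all covering intervals and sorting them at the end (objective: simpler — no candidate
-- list, no sort). A raises IndexError on gems = []; Pre_ excludes exactly that input.

-- ===== PORT A =====
-- A's sort key: the Python tuple (x[1]-x[0], x[0]), compared lexicographically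
def akey (x : List Int) : Lex (Int × Int) :=
  toLex (PySem.List.pyGetD x 1 0 - PySem.List.pyGetD x 0 0, PySem.List.pyGetD x 0 0)

-- the while-loop of A; the fuel argument only makes the loop total (each iteration moves
-- left or right, so 2*len(gems)+2 steps suffice on the executed states)
def aloop (gems : List String) (k : Nat) :
    Nat → Nat → Nat → PySem.Dict String Int → List (List Int) → List (List Int)
  | 0, _, _, _, acc => acc
  | fuel + 1, left, right, counter, acc =>
    if counter.size = k then
      let acc' := acc ++ [[(left : Int) + 1, (right : Int)]]
      let g := gems.getD left ""
      let v := counter.getD g 0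
      let counter' := if v > 1 then counter.insert g (v - 1) else counter.erase g
      aloop gems k fuel (left + 1) right counter' acc'
    else if gems.length ≤ right then acc
    else
      let g := gems.getD right ""
      aloop gems k fuel left (right + 1) (counter.insert g (counter.getD g 0 + 1)) acc

def solution (gems : List String) : List Int :=
  let original_s := PySem.Set.ofList gems
  if original_s.length = 1 then [1, 1]
  else
    let interval_list := aloop gems original_s.length (2 * gems.length + 2) 0 0 PySem.Dict.empty []
    (PySem.List.pyGet? (PySem.List.sorted interval_list akey false) 0).getD []

-- ===== PORT B =====
-- return [best[0], best[1]]; [] stands for the non-list result Python gives when best is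
-- still None (reachable only for gems = [], which Pre_ excludes)
def listifyBest : Option (Int × Int) → List Int
  | some (a, b) => [a, b]
  | none => []

-- the inner while-loop of B; fuel len(gems)+1 suffices on the executed states
def bShrink (gems : List String) (k : Nat) :
    Nat → Nat → Int → PySem.Dict String Int → Option (Int × Int) →
    Nat × PySem.Dict String Int × Option (Int × Int)
  | 0, l, _, count, best => (l, count, best)
  | fuel + 1, l, r, count, best =>
    if count.size = k then
      let best' :=
        match best with
        | none => some ((l : Int) + 1, r + 1)
        | some (a, b) =>
          if (r - (l : Int) < b - a) ∨ (r - (l : Int) = b - a ∧ (l : Int) + 1 < a) then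
            some ((l : Int) + 1, r + 1)
          else some (a, b)
      let g := gems.getD l ""
      let v := count.getD g 0
      let count' := if v > 1 then count.insert g (v - 1) else count.erase g
      bShrink gems k fuel (l + 1) r count' best'
    else (l, count, best)

def solution_alt (gems : List String) : List Int :=
  let kinds := (PySem.Set.ofList gems).length
  let final := (PySem.List.enumerate gems).foldl
    (fun (st : Nat × PySem.Dict String Int × Option (Int × Int)) (p : Int × String) =>
      let count := st.2.1.insert p.2 (st.2.1.getD p.2 0 + 1)
      bShrink gems kinds (gems.length + 1) st.1 p.1 count st.2.2)
    (0, PySem.Dict.empty, none)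
  listifyBest final.2.2


-- ===== PRECONDITION & SPEC =====
-- Pre_ excludes only gems = [], where the Python A raises IndexError (counter[gems[0]] on an empty list)
def Pre_solution (gems : List String) : Prop := gems ≠ []
instance (gems : List String) : Decidable (Pre_solution gems) := by unfold Pre_solution; infer_instance
def pvWitness_solution : List String := (["a", "b", "a", "c"])

def Spec_solution (gems : List String) (out : List Int) : Prop := out = solution_alt gems
instance (gems : List String) (out : List Int) : Decidable (Spec_solution gems out) := by unfold Spec_solution; infer_instance

-- ===== CLAIM (what is proved, stated in full; the proofs are below) =====
def Claim_equal_solution : Prop := ∀ (gems : List String), Dom_solution gems → Pre_solution gems → Spec_solution gems (solution gems)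

-- ===== LEMMAS AND PROOFS =====

theorem dict_find?_filter_ne {ν : Type} (its : List (String × ν)) (k k' : String) :
    List.find? (fun p => p.1 == k') (its.filter (fun p => !(p.1 == k)))
      = if k' = k then none else List.find? (fun p => p.1 == k') its := by
  induction its with
  | nil => simp
  | cons p t ih =>
    by_cases hpk : p.1 = k <;> by_cases hk' : k' = k <;> by_cases hpk' : p.1 = k' <;>
      simp_all [List.filter_cons, List.find?_cons]

theorem dict_get?_erase {ν : Type} (d : PySem.Dict String ν) (k k' : String) :
    (d.erase k).get? k' = if k' = k then none else d.get? k' := by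
  obtain ⟨its⟩ := d
  simp only [PySem.Dict.erase, PySem.Dict.get?, dict_find?_filter_ne]
  split <;> rfl

theorem dict_getD_erase {ν : Type} (d : PySem.Dict String ν) (k k' : String) (d0 : ν) :
    (d.erase k).getD k' d0 = if k' = k then d0 else d.getD k' d0 := by
  simp only [PySem.Dict.getD, dict_get?_erase]; split <;> rfl

theorem dict_keys_erase {ν : Type} (d : PySem.Dict String ν) (k : String) :
    (d.erase k).keys = d.keys.filter (fun x => !(x == k)) := by
  obtain ⟨its⟩ := d
  simp [PySem.Dict.erase, PySem.Dict.keys, List.filter_map]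
  rfl

theorem dict_mem_keys_erase {ν : Type} (d : PySem.Dict String ν) (k g : String) :
    g ∈ (d.erase k).keys ↔ g ∈ d.keys ∧ ¬ g = k := by
  simp [dict_keys_erase]

theorem dict_nodup_keys_erase {ν : Type} (d : PySem.Dict String ν) (k : String)
    (h : d.keys.Nodup) : (d.erase k).keys.Nodup := by
  rw [dict_keys_erase]; exact h.filter _

theorem dict_size_eq_keys_length {κ ν : Type} (d : PySem.Dict κ ν) :
    d.size = d.keys.length := by
  simp [PySem.Dict.size, PySem.Dict.keys]

def window (gems : List String) (l r : Nat) : List String := (gems.drop l).take (r - l)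

theorem window_zero (gems : List String) (l : Nat) : window gems l l = [] := by
  simp [window]

theorem window_snoc (gems : List String) (l r : Nat) (hlr : l ≤ r) (hrn : r < gems.length) :
    window gems l (r + 1) = window gems l r ++ [gems[r]] := by
  unfold window
  have h1 : r + 1 - l = (r - l) + 1 := by omega
  have h2 : r - l < (gems.drop l).length := by simp [List.length_drop]; omega
  rw [h1, List.take_add_one]
  congr 1
  rw [List.getElem?_eq_getElem h2]
  simp [List.getElem_drop]
  congr 1
  omega

theorem window_cons (gems : List String) (l r : Nat) (hlr : l < r) (hln : l < gems.length) :
    window gems l r = gems[l] :: window gems (l + 1) r := by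
  unfold window
  rw [List.drop_eq_getElem_cons hln]
  have h1 : r - l = (r - (l + 1)) + 1 := by omega
  rw [h1, List.take_succ_cons]

theorem window_ne_nil (gems : List String) (l r : Nat) (h : window gems l r ≠ []) :
    l < r ∧ l < gems.length := by
  unfold window at h
  constructor
  · by_contra hc; apply h; have : r - l = 0 := by omega
    simp [this]
  · by_contra hc; apply h; have : gems.drop l = [] := by
      rw [List.drop_eq_nil_iff]; omega
    simp [this]

def cntOK (gems : List String) (l r : Nat) (c : PySem.Dict String Int) : Prop :=
  c.keys.Nodup ∧
  (∀ g, c.getD g 0 = ((window gems l r).count g : Int)) ∧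
  (∀ g, g ∈ c.keys ↔ 0 < (window gems l r).count g)

theorem cntOK_init (gems : List String) : cntOK gems 0 0 PySem.Dict.empty := by
  refine ⟨by simp [pysem], fun g => ?_, fun g => ?_⟩ <;> simp [window_zero, pysem]

theorem cntOK_add (gems : List String) (l r : Nat) (c : PySem.Dict String Int)
    (hc : cntOK gems l r c) (hlr : l ≤ r) (hrn : r < gems.length) :
    cntOK gems l (r + 1) (c.insert (gems.getD r "") (c.getD (gems.getD r "") 0 + 1)) := by
  obtain ⟨hnd, hcnt, hmem⟩ := hc
  have hg : gems.getD r "" = gems[r] := List.getD_eq_getElem gems "" hrn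
  have hw := window_snoc gems l r hlr hrn
  rw [hg]
  refine ⟨PySem.Dict.nodup_keys_insert _ _ _ hnd, fun g => ?_, fun g => ?_⟩
  · rw [PySem.Dict.getD_insert, hw, List.count_append]
    by_cases he : g = gems[r]
    · rw [if_pos he, hcnt, he]
      have : List.count gems[r] [gems[r]] = 1 := by simp
      rw [this]; push_cast; ring
    · rw [if_neg he, hcnt]
      have : List.count g [gems[r]] = 0 := by
        simp [List.count_singleton]; exact fun h => he h.symm
      rw [this, Nat.add_zero]
  · rw [PySem.Dict.mem_keys_insert, hw, List.count_append]
    by_cases he : g = gems[r]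
    · have : List.count g [gems[r]] = 1 := by rw [he]; simp
      rw [this]; simp [he]
    · have : List.count g [gems[r]] = 0 := by
        simp [List.count_singleton]; exact fun h => he h.symm
      rw [this, Nat.add_zero]; simp [he, hmem]

theorem cntOK_pop (gems : List String) (l r : Nat) (c : PySem.Dict String Int)
    (hc : cntOK gems l r c) (hlr : l < r) (hln : l < gems.length) :
    cntOK gems (l + 1) r
      (if c.getD (gems.getD l "") 0 > 1 then
        c.insert (gems.getD l "") (c.getD (gems.getD l "") 0 - 1)
      else c.erase (gems.getD l "")) := by
  obtain ⟨hnd, hcnt, hmem⟩ := hc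
  have hg : gems.getD l "" = gems[l] := List.getD_eq_getElem gems "" hln
  have hw := window_cons gems l r hlr hln
  rw [hg]
  have hcount : ∀ g, (window gems l r).count g
      = (window gems (l + 1) r).count g + (if gems[l] = g then 1 else 0) := by
    intro g; rw [hw, List.count_cons]
    by_cases h : gems[l] = g <;> simp [h]
  have hv : c.getD gems[l] 0 = ((window gems (l+1) r).count gems[l] : Int) + 1 := by
    rw [hcnt, hcount]; simp
  by_cases hgt : c.getD gems[l] 0 > 1
  · rw [if_pos hgt]
    refine ⟨PySem.Dict.nodup_keys_insert _ _ _ hnd, fun g => ?_, fun g => ?_⟩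
    · rw [PySem.Dict.getD_insert]
      by_cases he : g = gems[l]
      · rw [if_pos he, he, hv]; ring
      · rw [if_neg he, hcnt, hcount]
        have : ¬ gems[l] = g := fun h => he h.symm
        rw [if_neg this]; push_cast; ring
    · rw [PySem.Dict.mem_keys_insert]
      by_cases he : g = gems[l]
      · have hpos : 0 < (window gems (l+1) r).count gems[l] := by omega
        simp [he, hpos]
      · have hne : ¬ gems[l] = g := fun h => he h.symm
        simp only [he, false_or, hmem, hcount, if_neg hne, add_zero]
  · rw [if_neg hgt]
    have hv1 : ((window gems (l+1) r).count gems[l] : Int) = 0 := by omega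
    have hv1' : (window gems (l+1) r).count gems[l] = 0 := by exact_mod_cast hv1
    refine ⟨dict_nodup_keys_erase _ _ hnd, fun g => ?_, fun g => ?_⟩
    · rw [dict_getD_erase]
      by_cases he : g = gems[l]
      · rw [if_pos he, he]; omega
      · rw [if_neg he, hcnt, hcount]
        have : ¬ gems[l] = g := fun h => he h.symm
        rw [if_neg this]; push_cast; ring
    · rw [dict_mem_keys_erase]
      by_cases he : g = gems[l]
      · simp [he, hv1']
      · have hne : ¬ gems[l] = g := fun h => he h.symm
        simp only [he, hmem, hcount, if_neg hne, add_zero]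
        tauto

theorem covered_bounds (gems : List String) (k l r : Nat) (c : PySem.Dict String Int)
    (hc : cntOK gems l r c) (hk : 1 ≤ k) (hcov : c.size = k) :
    l < r ∧ l < gems.length := by
  obtain ⟨hnd, hcnt, hmem⟩ := hc
  have hlen : c.keys.length = k := by rw [← dict_size_eq_keys_length, hcov]
  have hne : c.keys ≠ [] := by intro h; rw [h] at hlen; simp at hlen; omega
  obtain ⟨g, hg⟩ := List.exists_mem_of_ne_nil _ hne
  have : 0 < (window gems l r).count g := (hmem g).1 hg
  have hmemw : g ∈ window gems l r := List.count_pos_iff.mp this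
  exact window_ne_nil gems l r (List.ne_nil_of_mem hmemw)

theorem size_le_kinds (gems : List String) (l r : Nat) (c : PySem.Dict String Int)
    (hc : cntOK gems l r c) : c.size ≤ (PySem.Set.ofList gems).length := by
  obtain ⟨hnd, hcnt, hmem⟩ := hc
  rw [dict_size_eq_keys_length]
  refine List.Subperm.length_le (List.subperm_of_subset hnd ?_)
  intro g hg
  have : 0 < (window gems l r).count g := (hmem g).1 hg
  have hmemw : g ∈ window gems l r := List.count_pos_iff.mp this
  have : g ∈ gems := List.mem_of_mem_drop (List.mem_of_mem_take hmemw)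
  exact (PySem.Set.mem_ofList gems g).mpr this

def bstep (best : Option (Int × Int)) (cand : Int × Int) : Option (Int × Int) :=
  match best with
  | none => some cand
  | some (a, b) =>
    if (cand.2 - cand.1 < b - a) ∨ (cand.2 - cand.1 = b - a ∧ cand.1 < a) then some cand
    else some (a, b)

def minsel (acc : List (List Int)) : Option (Int × Int) :=
  acc.foldl (fun best x => bstep best (PySem.List.pyGetD x 0 0, PySem.List.pyGetD x 1 0)) none

def sel (il : List (List Int)) : List Int :=
  (PySem.List.pyGet? (PySem.List.sorted il akey false) 0).getD []

def ple (p q : Int × Int) : Prop := p.1 < q.1 ∨ (p.1 = q.1 ∧ p.2 ≤ q.2)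

theorem pyGetD_pair0 (a b : Int) : PySem.List.pyGetD [a, b] 0 0 = a := rfl
theorem pyGetD_pair1 (a b : Int) : PySem.List.pyGetD [a, b] 1 0 = b := rfl

theorem ple_trans {p q r : Int × Int} (h1 : ple p q) (h2 : ple q r) : ple p r := by
  obtain ⟨p1, p2⟩ := p; obtain ⟨q1, q2⟩ := q; obtain ⟨r1, r2⟩ := r
  simp only [ple] at *; omega

theorem bstep_some (best : Option (Int × Int)) (cand : Int × Int) :
    ∃ v, bstep best cand = some v ∧
      (v = cand ∨ (best = some v ∧ ple (v.2 - v.1, v.1) (cand.2 - cand.1, cand.1))) ∧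
      (∀ a b, best = some (a, b) → ple (v.2 - v.1, v.1) (b - a, a)) := by
  obtain ⟨c1, c2⟩ := cand
  cases best with
  | none => exact ⟨(c1, c2), rfl, Or.inl rfl, by intro a b h; cases h⟩
  | some w =>
    obtain ⟨a0, b0⟩ := w
    by_cases hcond : (c2 - c1 < b0 - a0) ∨ (c2 - c1 = b0 - a0 ∧ c1 < a0)
    · refine ⟨(c1, c2), by simp [bstep, hcond], Or.inl rfl, ?_⟩
      intro a b h; injection h with h; cases h
      simp only [ple]
      rcases hcond with h | ⟨h1, h2⟩
      · exact Or.inl h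
      · exact Or.inr ⟨h1, le_of_lt h2⟩
    · refine ⟨(a0, b0), by simp [bstep, hcond], Or.inr ⟨rfl, ?_⟩, ?_⟩
      · simp only [ple]
        rcases lt_trichotomy (c2 - c1) (b0 - a0) with h | h | h
        · exact absurd (Or.inl h) hcond
        · refine Or.inr ⟨h.symm, ?_⟩
          by_contra hlt
          exact hcond (Or.inr ⟨h, by omega⟩)
        · exact Or.inl h
      · intro a b h; injection h with h; cases h
        show (_ < _) ∨ _; omega

theorem fold_inv (acc : List (List Int)) :
    ∀ (best : Option (Int × Int)) (a b : Int),
    acc.foldl (fun best x => bstep best (PySem.List.pyGetD x 0 0, PySem.List.pyGetD x 1 0)) best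
      = some (a, b) →
    ((∃ x ∈ acc, (PySem.List.pyGetD x 0 0, PySem.List.pyGetD x 1 0) = (a, b)) ∨ best = some (a, b)) ∧
    (∀ y ∈ acc, ple (b - a, a) (PySem.List.pyGetD y 1 0 - PySem.List.pyGetD y 0 0, PySem.List.pyGetD y 0 0)) ∧
    (∀ p q, best = some (p, q) → ple (b - a, a) (q - p, p)) := by
  induction acc with
  | nil =>
    intro best a b h
    simp only [List.foldl_nil] at h
    refine ⟨Or.inr h, by simp, fun p q hb => ?_⟩
    rw [h] at hb; injection hb with hb; injection hb with h1 h2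
    subst h1; subst h2; simp [ple]
  | cons x t ih =>
    intro best a b h
    simp only [List.foldl_cons] at h
    obtain ⟨v, hv, hvc, hvle⟩ := bstep_some best (PySem.List.pyGetD x 0 0, PySem.List.pyGetD x 1 0)
    rw [hv] at h
    obtain ⟨ih1, ih2, ih3⟩ := ih (some v) a b h
    have hresv : ple (b - a, a) (v.2 - v.1, v.1) := ih3 v.1 v.2 (by rw [Prod.mk.eta])
    have hx : ple (b - a, a)
        (PySem.List.pyGetD x 1 0 - PySem.List.pyGetD x 0 0, PySem.List.pyGetD x 0 0) := by
      rcases hvc with rfl | ⟨hb, hle⟩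
      · exact hresv
      · exact ple_trans hresv hle
    refine ⟨?_, ?_, ?_⟩
    · rcases ih1 with h1 | h1
      · obtain ⟨y, hy, hyp⟩ := h1; exact Or.inl ⟨y, List.mem_cons_of_mem _ hy, hyp⟩
      · injection h1 with h1
        rcases hvc with rfl | ⟨hb, _⟩
        · exact Or.inl ⟨x, List.mem_cons_self, by rw [h1]⟩
        · exact Or.inr (by rw [hb, h1])
    · intro y hy
      rcases List.mem_cons.mp hy with rfl | hy
      · exact hx
      · exact ih2 y hy
    · intro p' q' hb
      exact ple_trans hresv (hvle p' q' hb)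

theorem pyGet?_cons_zero (h : List Int) (tl : List (List Int)) :
    PySem.List.pyGet? (h :: tl) 0 = some h := by
  simp [PySem.List.pyGet?, PySem.List.pyIdx?]

theorem ple_toLex (p q : Int × Int) : ple p q ↔ toLex p ≤ toLex q := by
  rw [Prod.Lex.toLex_le_toLex]; rfl

theorem foldl_bstep_some (t : List (List Int)) :
    ∀ (v : Int × Int), ∃ w,
      t.foldl (fun best x => bstep best (PySem.List.pyGetD x 0 0, PySem.List.pyGetD x 1 0)) (some v)
        = some w := by
  induction t with
  | nil => exact fun v => ⟨v, rfl⟩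
  | cons x t ih =>
    intro v
    obtain ⟨u, hu, -, -⟩ := bstep_some (some v) (PySem.List.pyGetD x 0 0, PySem.List.pyGetD x 1 0)
    simp only [List.foldl_cons, hu]
    exact ih u

theorem minsel_of_ne_nil (acc : List (List Int)) (h : acc ≠ []) :
    ∃ v, minsel acc = some v := by
  cases acc with
  | nil => exact absurd rfl h
  | cons x t =>
    unfold minsel
    simp only [List.foldl_cons]
    have : bstep none (PySem.List.pyGetD x 0 0, PySem.List.pyGetD x 1 0)
        = some (PySem.List.pyGetD x 0 0, PySem.List.pyGetD x 1 0) := rfl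
    rw [this]
    exact foldl_bstep_some t _

theorem pairwise_ne_inj : ∀ (acc : List (List Int)),
    acc.Pairwise (fun x y => PySem.List.pyGetD x 0 0 ≠ PySem.List.pyGetD y 0 0) →
    ∀ x y : List Int, x ∈ acc → y ∈ acc →
    PySem.List.pyGetD x 0 0 = PySem.List.pyGetD y 0 0 → x = y := by
  intro acc
  induction acc with
  | nil => intro _ x y hx _ _; cases hx
  | cons z t ih =>
    intro hp x y hx hy hxy
    obtain ⟨hz, ht⟩ := List.pairwise_cons.mp hp
    rcases List.mem_cons.mp hx with rfl | hx' <;> rcases List.mem_cons.mp hy with rfl | hy'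
    · rfl
    · exact absurd hxy (hz y hy')
    · exact absurd hxy.symm (hz x hx')
    · exact ih ht x y hx' hy' hxy

theorem sort_head (acc : List (List Int)) (h2 : ∀ x ∈ acc, ∃ a b : Int, x = [a, b])
    (hp : acc.Pairwise (fun x y => PySem.List.pyGetD x 0 0 ≠ PySem.List.pyGetD y 0 0)) :
    sel acc = listifyBest (minsel acc) := by
  cases hacc : acc with
  | nil => rfl
  | cons x0 t0 =>
    rw [← hacc]
    have hne : acc ≠ [] := by rw [hacc]; simp
    obtain ⟨v, hv⟩ := minsel_of_ne_nil acc hne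
    obtain ⟨a, b⟩ := v
    obtain ⟨hm, hmin, -⟩ := fold_inv acc none a b hv
    have hmem : [a, b] ∈ acc := by
      rcases hm with ⟨y, hy, hyp⟩ | hcon
      · obtain ⟨a', b', rfl⟩ := h2 y hy
        rw [pyGetD_pair0, pyGetD_pair1] at hyp
        injection hyp with e1 e2; rw [e1, e2] at hy; exact hy
      · cases hcon
    cases hs : PySem.List.sorted acc akey false with
    | nil => exact absurd ((PySem.List.sorted_eq_nil_iff acc akey false).mp hs) hne
    | cons h tl =>
      have hhead : sel acc = h := by rw [sel, hs, pyGet?_cons_zero]; rfl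
      have hhmem : h ∈ acc := (PySem.List.sorted_perm acc akey false).subset (by rw [hs]; simp)
      have hle1 : akey h ≤ akey [a, b] := PySem.List.key_head_sorted_le acc akey hs [a, b] hmem
      have hle2 : akey [a, b] ≤ akey h := by
        have := hmin h hhmem
        rw [ple_toLex] at this
        have hk : akey [a, b] = toLex (b - a, a) := by rw [akey, pyGetD_pair0, pyGetD_pair1]
        rw [hk]; exact this
      have hkeq : akey h = akey [a, b] := le_antisymm hle1 hle2
      have hstart : PySem.List.pyGetD h 0 0 = PySem.List.pyGetD [a, b] 0 0 := by
        have := congrArg (fun z => (ofLex z).2) hkeq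
        simpa [akey] using this
      have : h = [a, b] := pairwise_ne_inj acc hp h [a, b] hhmem hmem hstart
      rw [hhead, this, hv]; rfl

def accOK (acc : List (List Int)) (l : Nat) : Prop :=
  (∀ x ∈ acc, ∃ a b : Int, x = [a, b]) ∧
  acc.Pairwise (fun x y => PySem.List.pyGetD x 0 0 ≠ PySem.List.pyGetD y 0 0) ∧
  (∀ x ∈ acc, PySem.List.pyGetD x 0 0 ≤ (l : Int))

theorem accOK_step (acc : List (List Int)) (l r : Nat) (h : accOK acc l) :
    accOK (acc ++ [[(l : Int) + 1, (r : Int)]]) (l + 1) := by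
  obtain ⟨h2, hp, hb⟩ := h
  refine ⟨?_, ?_, ?_⟩
  · intro x hx
    rcases List.mem_append.mp hx with hx | hx
    · exact h2 x hx
    · exact ⟨_, _, List.mem_singleton.mp hx⟩
  · rw [List.pairwise_append]
    refine ⟨hp, List.pairwise_singleton _ _, ?_⟩
    intro x hx y hy
    rw [List.mem_singleton.mp hy, pyGetD_pair0]
    have := hb x hx
    intro he; rw [he] at this; omega
  · intro x hx
    rcases List.mem_append.mp hx with hx | hx
    · have := hb x hx; push_cast; omega
    · rw [List.mem_singleton.mp hx, pyGetD_pair0]; push_cast; omega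

theorem minsel_snoc (acc : List (List Int)) (a b : Int) :
    minsel (acc ++ [[a, b]]) = bstep (minsel acc) (a, b) := by
  unfold minsel
  rw [List.foldl_append]
  simp only [List.foldl_cons, List.foldl_nil, pyGetD_pair0, pyGetD_pair1]

theorem bstep_match (best : Option (Int × Int)) (l : Nat) (r : Int) :
    (match best with
     | none => some ((l : Int) + 1, r + 1)
     | some (a, b) =>
       if (r - (l : Int) < b - a) ∨ (r - (l : Int) = b - a ∧ (l : Int) + 1 < a) then
         some ((l : Int) + 1, r + 1)
       else some (a, b)) = bstep best ((l : Int) + 1, r + 1) := by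
  cases best with
  | none => rfl
  | some p =>
    obtain ⟨a, b⟩ := p
    show _ = if _ then _ else _
    have he : r + 1 - ((l : Int) + 1) = r - (l : Int) := by ring
    simp only [he]

theorem comb (gems : List String) (k : Nat) (hk : 1 ≤ k) :
    ∀ fuel l r (c : PySem.Dict String Int) acc best fuelB,
      cntOK gems l r c → accOK acc l → l ≤ r → 1 ≤ r → r ≤ gems.length →
      (gems.length - r) + (gems.length - l) + 1 ≤ fuel → r - l < fuelB →
      best = minsel acc →
      sel (aloop gems k fuel l r c acc)
        = listifyBest ((PySem.List.enumerate (gems.drop r) (r : Int)).foldl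
            (fun (st : Nat × PySem.Dict String Int × Option (Int × Int)) (p : Int × String) =>
              let count := st.2.1.insert p.2 (st.2.1.getD p.2 0 + 1)
              bShrink gems k (gems.length + 1) st.1 p.1 count st.2.2)
            (bShrink gems k fuelB l ((r : Int) - 1) c best)).2.2 := by
  intro fuel
  induction fuel with
  | zero => intro l r c acc best fuelB _ _ _ _ _ hm _ _; omega
  | succ fuel ih =>
    intro l r c acc best fuelB hc hacc hlr hr1 hrn hm hfB hbest
    by_cases hcov : c.size = k
    · obtain ⟨hlr', hln⟩ := covered_bounds gems k l r c hc hk hcov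
      cases fuelB with
      | zero => omega
      | succ fB =>
        have hA : aloop gems k (fuel + 1) l r c acc
            = aloop gems k fuel (l + 1) r
              (if c.getD (gems.getD l "") 0 > 1 then
                c.insert (gems.getD l "") (c.getD (gems.getD l "") 0 - 1)
              else c.erase (gems.getD l ""))
              (acc ++ [[(l : Int) + 1, (r : Int)]]) := by
          simp only [aloop, if_pos hcov]
        have hB : bShrink gems k (fB + 1) l ((r : Int) - 1) c best
            = bShrink gems k fB (l + 1) ((r : Int) - 1)
              (if c.getD (gems.getD l "") 0 > 1 then
                c.insert (gems.getD l "") (c.getD (gems.getD l "") 0 - 1)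
              else c.erase (gems.getD l ""))
              (bstep best ((l : Int) + 1, (r : Int))) := by
          simp only [bShrink, if_pos hcov, bstep_match]
          have : (r : Int) - 1 + 1 = (r : Int) := by ring
          rw [this]
        rw [hA, hB]
        exact ih (l + 1) r _ _ _ fB
          (cntOK_pop gems l r c hc hlr' hln)
          (accOK_step acc l r hacc)
          (by omega) hr1 hrn (by omega) (by omega)
          (by rw [hbest, minsel_snoc])
    · cases fuelB with
      | zero => omega
      | succ fB =>
        have hB : bShrink gems k (fB + 1) l ((r : Int) - 1) c best = (l, c, best) := by
          simp only [bShrink, if_neg hcov]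
        rw [hB]
        by_cases hge : gems.length ≤ r
        · have hreq : r = gems.length := le_antisymm hrn hge
          have hA : aloop gems k (fuel + 1) l r c acc = acc := by
            simp only [aloop, if_neg hcov, if_pos hge]
          rw [hA, hreq, List.drop_length]
          simp only [PySem.List.enumerate_nil, List.foldl_nil]
          obtain ⟨h2, hp, -⟩ := hacc
          rw [hbest]
          exact sort_head acc h2 hp
        · have hrn' : r < gems.length := lt_of_not_ge hge
          have hg : gems.getD r "" = gems[r] := List.getD_eq_getElem gems "" hrn'
          have hA : aloop gems k (fuel + 1) l r c acc
              = aloop gems k fuel l (r + 1)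
                (c.insert (gems.getD r "") (c.getD (gems.getD r "") 0 + 1)) acc := by
            simp only [aloop, if_neg hcov, if_neg hge]
          rw [hA]
          rw [List.drop_eq_getElem_cons hrn', PySem.List.enumerate_cons, List.foldl_cons]
          have e1 : ((r + 1 : Nat) : Int) = (r : Int) + 1 := by push_cast; ring
          have e2 : ((r + 1 : Nat) : Int) - 1 = (r : Int) := by push_cast; ring
          have := ih l (r + 1) (c.insert (gems.getD r "") (c.getD (gems.getD r "") 0 + 1))
            acc best (gems.length + 1)
            (cntOK_add gems l r c hc hlr hrn')
            hacc (by omega) (by omega) (by omega) (by omega) (by omega) hbest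
          rw [e2, e1] at this
          rw [this]
          simp only [hg]

theorem bs1 (gems : List String) (hk1 : (PySem.Set.ofList gems).length = 1) :
    ∀ fuel l (r : Nat) (c : PySem.Dict String Int) best,
      cntOK gems l (r + 1) c → l ≤ r + 1 → r + 1 ≤ gems.length →
      ((best = none ∧ l = 0 ∧ r = 0) ∨ best = some (1, 1)) →
      (r + 1) - l < fuel →
      ∃ l' c', bShrink gems 1 fuel l (r : Int) c best = (l', c', some (1, 1)) ∧
        cntOK gems l' (r + 1) c' ∧ l' ≤ r + 1 := by
  intro fuel
  induction fuel with
  | zero => intro l r c best _ _ _ _ h; omega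
  | succ fuel ih =>
    intro l r c best hc hlr hrn hbest hm
    by_cases hcov : c.size = 1
    · obtain ⟨hlr', hln⟩ := covered_bounds gems 1 l (r + 1) c hc le_rfl hcov
      have hbest' : (match best with
          | none => some ((l : Int) + 1, (r : Int) + 1)
          | some (a, b) =>
            if ((r : Int) - (l : Int) < b - a) ∨ ((r : Int) - (l : Int) = b - a ∧ (l : Int) + 1 < a) then
              some ((l : Int) + 1, (r : Int) + 1)
            else some (a, b)) = some (1, 1) := by
        rcases hbest with ⟨rfl, rfl, rfl⟩ | rfl
        · norm_num
        · have hcond : ¬ (((r : Int) - (l : Int) < (1 : Int) - 1) ∨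
              ((r : Int) - (l : Int) = (1 : Int) - 1 ∧ (l : Int) + 1 < 1)) := by
            push_neg
            constructor
            · omega
            · intro _; omega
          show (if _ then _ else _) = _
          rw [if_neg hcond]
      have hB : bShrink gems 1 (fuel + 1) l (r : Int) c best
          = bShrink gems 1 fuel (l + 1) (r : Int)
            (if c.getD (gems.getD l "") 0 > 1 then
              c.insert (gems.getD l "") (c.getD (gems.getD l "") 0 - 1)
            else c.erase (gems.getD l "")) (some (1, 1)) := by
        simp only [bShrink, if_pos hcov, hbest']
      rw [hB]
      exact ih (l + 1) r _ (some (1, 1))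
        (cntOK_pop gems l (r + 1) c hc hlr' hln)
        (by omega) hrn (Or.inr rfl) (by omega)
    · have hB : bShrink gems 1 (fuel + 1) l (r : Int) c best = (l, c, best) := by
        simp only [bShrink, if_neg hcov]
      have hbs : best = some (1, 1) := by
        rcases hbest with ⟨rfl, rfl, rfl⟩ | rfl
        · -- l = 0, r = 0: the window gems[0:1] is nonempty, so the dict has ≥ 1 key,
          -- and ≤ 1 keys because there is only one kind: contradiction with ¬ covered
          exfalso
          obtain ⟨hnd, hcnt, hmem⟩ := hc
          have h0n : 0 < gems.length := by omega
          have hwin : gems[0] ∈ window gems 0 1 := by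
            rw [window_cons gems 0 1 (by omega) h0n]
            exact List.mem_cons_self
          have h1 : 0 < (window gems 0 1).count gems[0] := List.count_pos_iff.mpr hwin
          have h2 : gems[0] ∈ PySem.Dict.keys c := (hmem gems[0]).2 h1
          have h3 : 0 < c.size := by
            rw [dict_size_eq_keys_length]
            exact List.length_pos_of_mem h2
          have h4 : c.size ≤ 1 := by
            have := size_le_kinds gems 0 1 c ⟨hnd, hcnt, hmem⟩
            omega
          omega
        · rfl
      exact ⟨l, c, by rw [hB, hbs], hc, hlr⟩

theorem fold1 (gems : List String) (hk1 : (PySem.Set.ofList gems).length = 1) :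
    ∀ m r l (c : PySem.Dict String Int) best,
      gems ≠ [] → r ≤ gems.length → gems.length - r ≤ m →
      cntOK gems l r c → l ≤ r →
      ((best = none ∧ l = 0 ∧ r = 0) ∨ best = some (1, 1)) →
      ((PySem.List.enumerate (gems.drop r) (r : Int)).foldl
        (fun (st : Nat × PySem.Dict String Int × Option (Int × Int)) (p : Int × String) =>
          let count := st.2.1.insert p.2 (st.2.1.getD p.2 0 + 1)
          bShrink gems 1 (gems.length + 1) st.1 p.1 count st.2.2)
        (l, c, best)).2.2 = some (1, 1) := by
  intro m
  induction m with
  | zero =>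
    intro r l c best hne hrn hm hc hlr hbest
    have hreq : r = gems.length := by omega
    rw [hreq, List.drop_length]
    simp only [PySem.List.enumerate_nil, List.foldl_nil]
    rcases hbest with ⟨rfl, rfl, rfl⟩ | rfl
    · exact absurd (List.eq_nil_of_length_eq_zero (by omega)) hne
    · rfl
  | succ m ih =>
    intro r l c best hne hrn hm hc hlr hbest
    by_cases hge : gems.length ≤ r
    · have hreq : r = gems.length := le_antisymm hrn hge
      rw [hreq, List.drop_length]
      simp only [PySem.List.enumerate_nil, List.foldl_nil]
      rcases hbest with ⟨rfl, rfl, rfl⟩ | rfl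
      · exact absurd (List.eq_nil_of_length_eq_zero (by omega)) hne
      · rfl
    · have hrn' : r < gems.length := lt_of_not_ge hge
      have hg : gems.getD r "" = gems[r] := List.getD_eq_getElem gems "" hrn'
      rw [List.drop_eq_getElem_cons hrn', PySem.List.enumerate_cons, List.foldl_cons]
      obtain ⟨l', c', heq, hc', hl'⟩ := bs1 gems hk1 (gems.length + 1) l r
        (c.insert gems[r] (c.getD gems[r] 0 + 1)) best
        (by rw [← hg]; exact cntOK_add gems l r c hc hlr hrn')
        (by omega) (by omega)
        (by rcases hbest with ⟨h1, h2, h3⟩ | h1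
            · exact Or.inl ⟨h1, h2, h3⟩
            · exact Or.inr h1)
        (by omega)
      show ((PySem.List.enumerate (gems.drop (r + 1)) ((r : Int) + 1)).foldl _
        (bShrink gems 1 (gems.length + 1) l (r : Int)
          (c.insert gems[r] (c.getD gems[r] 0 + 1)) best)).2.2 = some (1, 1)
      rw [heq]
      have e1 : ((r + 1 : Nat) : Int) = (r : Int) + 1 := by push_cast; ring
      have := ih (r + 1) l' c' (some (1, 1)) hne (by omega) (by omega) hc' hl' (Or.inr rfl)
      rw [e1] at this
      exact this

theorem alt_single (gems : List String) (hne : gems ≠ [])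
    (hk1 : (PySem.Set.ofList gems).length = 1) : solution_alt gems = [1, 1] := by
  have h0 : PySem.List.enumerate gems 0 = PySem.List.enumerate (gems.drop 0) (((0 : Nat) : Int)) := by
    rw [List.drop_zero]; norm_num
  show listifyBest ((PySem.List.enumerate gems 0).foldl
      (fun (st : Nat × PySem.Dict String Int × Option (Int × Int)) (p : Int × String) =>
        let count := st.2.1.insert p.2 (st.2.1.getD p.2 0 + 1)
        bShrink gems ((PySem.Set.ofList gems).length) (gems.length + 1) st.1 p.1 count st.2.2)
      (0, PySem.Dict.empty, none)).2.2 = [1, 1]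
  rw [hk1, h0,
    fold1 gems hk1 gems.length 0 0 PySem.Dict.empty none hne (by omega) (by omega)
      (cntOK_init gems) le_rfl (Or.inl ⟨rfl, rfl, rfl⟩)]
  rfl

theorem solution_eq_alt (gems : List String) (hpre : gems ≠ []) :
    solution gems = solution_alt gems := by
  by_cases hk1 : (PySem.Set.ofList gems).length = 1
  · rw [alt_single gems hpre hk1]
    simp only [solution, if_pos hk1]
  · obtain ⟨g, t, rfl⟩ : ∃ g t, gems = g :: t := by
      cases gems with
      | nil => exact absurd rfl hpre
      | cons g t => exact ⟨g, t, rfl⟩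
    have hn : 1 ≤ (g :: t).length := by simp
    have hkge : 1 ≤ (PySem.Set.ofList (g :: t)).length := by
      have : g ∈ PySem.Set.ofList (g :: t) := (PySem.Set.mem_ofList _ g).mpr List.mem_cons_self
      exact List.length_pos_of_mem this
    have hcov0 : ¬ (PySem.Dict.empty : PySem.Dict String Int).size = (PySem.Set.ofList (g :: t)).length := by
      rw [PySem.Dict.size_empty]; omega
    have hA0 : solution (g :: t)
        = sel (aloop (g :: t) (PySem.Set.ofList (g :: t)).length
            (2 * (g :: t).length + 2) 0 0 PySem.Dict.empty []) := by
      simp only [solution, if_neg hk1]; rfl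
    have hc₁ : cntOK (g :: t) 0 1
        (PySem.Dict.empty.insert ((g :: t).getD 0 "")
          (PySem.Dict.empty.getD ((g :: t).getD 0 "") 0 + 1)) :=
      cntOK_add (g :: t) 0 0 PySem.Dict.empty (cntOK_init _) le_rfl (by simp)
    have hstep : aloop (g :: t) (PySem.Set.ofList (g :: t)).length
        (2 * (g :: t).length + 2) 0 0 PySem.Dict.empty []
        = aloop (g :: t) (PySem.Set.ofList (g :: t)).length (2 * (g :: t).length + 1) 0 1
          (PySem.Dict.empty.insert ((g :: t).getD 0 "")
            (PySem.Dict.empty.getD ((g :: t).getD 0 "") 0 + 1)) [] := by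
      have h2 : 2 * (g :: t).length + 2 = (2 * (g :: t).length + 1) + 1 := by ring
      rw [h2]
      simp only [aloop, if_neg hcov0]
      rw [if_neg (by omega : ¬ (g :: t).length ≤ 0)]
    have hcomb := comb (g :: t) (PySem.Set.ofList (g :: t)).length hkge
      (2 * (g :: t).length + 1) 0 1
      (PySem.Dict.empty.insert ((g :: t).getD 0 "")
        (PySem.Dict.empty.getD ((g :: t).getD 0 "") 0 + 1))
      [] none ((g :: t).length + 1)
      hc₁ ⟨by simp, by simp, by simp⟩ (by omega) le_rfl (by simp)
      (by simp; omega) (by omega) rfl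
    have e1 : ((1 : Nat) : Int) - 1 = (0 : Int) := by norm_num
    have e2 : ((1 : Nat) : Int) = (1 : Int) := by norm_num
    rw [e1, e2] at hcomb
    rw [hA0, hstep, hcomb]
    show _ = solution_alt (g :: t)
    simp only [solution_alt, PySem.List.enumerate_cons, List.foldl_cons]
    rfl

-- ===== VERDICT (by name: the statement is the Claim_ definition above) =====
theorem solution_spec : Claim_equal_solution := by
  intro gems _ hpre
  exact solution_eq_alt gems hpre
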